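-- pv_equiv track=rewrite | github.com/Telmo465/EasyRoads | teste.py | merge_by_bearing
-- ===== SOURCE A (Python) =====
-- def merge_by_bearing(segments, max_bearing_difference=3):
--     merged_segments = []
--     total = len(segments)
--
--     if total > 0:
--         merged_segments.append(segments[0])
--
--         for size in range(1, total):
--             current_segment = segments[size]
--
--             # Check if the bearing change is less than the threshold
--             if abs(current_segment[4]) <= max_bearing_difference:
--                 # Merge the current segment with the last one
--                 merged_segments[-1] = [merged_segments[-1][0], current_segment[1]] + [merged_segments[-1][2] + current_segment[2]] + current_segment[3:]
--             else:
--                 # Add a new segment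
--                 merged_segments.append(current_segment)
--
--     return merged_segments
-- ===== SOURCE B (Python) =====
-- def merge_by_bearing(segments, max_bearing_difference=3):
--     def split_run(rest):
--         # longest prefix of rest whose segments are mergeable (abs(seg[4]) <= threshold), plus the remainder
--         k = 0
--         while k < len(rest) and abs(rest[k][4]) <= max_bearing_difference:
--             k += 1
--         return rest[:k], rest[k:]
--
--     result = []
--     rest = segments
--     while rest:
--         head, rest = rest[0], rest[1:]
--         run, rest = split_run(rest)
--         if not run:
--             result.append(head)
--         else:
--             last = run[-1]
--             result.append([head[0], last[1], head[2] + sum(s[2] for s in run)] + last[3:])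
--     return result
-- ===== Notes on version B (the rewrite author's own statement) =====
-- stated objective: alternative
-- what changed: A carries a growing result list and repeatedly rewrites its last element to fold each mergeable segment in; B instead splits the tail into maximal mergeable runs with a dedicated run-splitting helper and emits one summary segment per run (head start, run-end fields, summed length).
import Mathlib
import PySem

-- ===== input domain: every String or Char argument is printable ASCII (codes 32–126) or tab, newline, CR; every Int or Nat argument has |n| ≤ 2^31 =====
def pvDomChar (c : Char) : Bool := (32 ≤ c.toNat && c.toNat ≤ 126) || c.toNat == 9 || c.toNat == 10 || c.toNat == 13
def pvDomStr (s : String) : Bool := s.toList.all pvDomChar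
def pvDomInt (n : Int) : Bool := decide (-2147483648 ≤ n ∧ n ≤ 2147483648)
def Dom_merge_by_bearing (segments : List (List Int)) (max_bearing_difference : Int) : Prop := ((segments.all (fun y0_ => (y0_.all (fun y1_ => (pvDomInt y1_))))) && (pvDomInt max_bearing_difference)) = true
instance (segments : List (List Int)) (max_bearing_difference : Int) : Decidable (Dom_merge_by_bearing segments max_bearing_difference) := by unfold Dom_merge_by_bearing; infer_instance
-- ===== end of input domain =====

-- B replaces A's carry-based loop (rebuilding merged[-1] each step) with a run-grouping
-- decomposition: split the tail into maximal mergeable runs and emit one summary per run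
-- (objective: alternative, same asymptotic cost).


-- ===== PORT A =====
-- A: keep a growing merged list; each mergeable segment is folded into merged[-1].
-- list indexing with in-range nonnegative literals is ported by List.getD (default only
-- reachable outside Pre_); current_segment[3:] is List.drop 3 (exact: nonnegative start).
def merge_by_bearing (segments : List (List Int)) (max_bearing_difference : Int) : List (List Int) :=
  if segments.length > 0 then
    segments.tail.foldl (fun merged cur =>
      if |cur.getD 4 0| ≤ max_bearing_difference then
        merged.dropLast ++
          [[(merged.getLastD []).getD 0 0, cur.getD 1 0] ++
           [(merged.getLastD []).getD 2 0 + cur.getD 2 0] ++ cur.drop 3]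
      else merged ++ [cur]) [segments.headD []]
  else []

-- ===== PORT B =====
-- split_run: longest prefix of rest with |seg[4]| ≤ threshold, plus the remainder
def pvSplitRun (m : Int) : List (List Int) → List (List Int) × List (List Int)
  | [] => ([], [])
  | s :: rest =>
    if |s.getD 4 0| ≤ m then ((s :: (pvSplitRun m rest).1), (pvSplitRun m rest).2)
    else ([], s :: rest)

theorem pvSplitRun_snd_len (m : Int) (l : List (List Int)) :
    (pvSplitRun m l).2.length ≤ l.length := by
  induction l with
  | nil => simp [pvSplitRun]
  | cons s rest ih =>
    simp only [pvSplitRun]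
    split
    · simpa using Nat.le_succ_of_le ih
    · simp

-- outer while loop of B: pop a head, split off its run, emit one output segment per group
def pvAltGo (m : Int) : List (List Int) → List (List Int)
  | [] => []
  | head :: rest =>
    let run := (pvSplitRun m rest).1
    let rest' := (pvSplitRun m rest).2
    (if run = [] then head
     else [head.getD 0 0, (run.getLastD []).getD 1 0,
           head.getD 2 0 + run.foldl (fun a s => a + s.getD 2 0) 0] ++
          (run.getLastD []).drop 3)
    :: pvAltGo m rest'
termination_by l => l.length
decreasing_by
  simp only [List.length_cons]
  exact Nat.lt_succ_of_le (pvSplitRun_snd_len m rest)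

def merge_by_bearing_alt (segments : List (List Int)) (max_bearing_difference : Int) : List (List Int) :=
  pvAltGo max_bearing_difference segments

-- ===== PRECONDITION & SPEC =====
-- Exactly where Python A returns: every tail segment needs index 4 (and, when merged, 1,2,3:),
-- so length ≥ 5; the head's indices 0 and 2 are read only when the second segment merges.
def Pre_merge_by_bearing (segments : List (List Int)) (max_bearing_difference : Int) : Prop :=
  (∀ seg ∈ segments.tail, 5 ≤ seg.length) ∧
  (2 ≤ segments.length → |(segments.getD 1 []).getD 4 0| ≤ max_bearing_difference →
    3 ≤ (segments.headD []).length)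
instance (segments : List (List Int)) (max_bearing_difference : Int) : Decidable (Pre_merge_by_bearing segments max_bearing_difference) := by unfold Pre_merge_by_bearing; infer_instance

def pvWitness_merge_by_bearing : List (List Int) × Int :=
  ([[0, 1, 2, 0, 0], [1, 2, 3, 0, 1], [2, 3, 4, 0, 9]], 3)

def Spec_merge_by_bearing (segments : List (List Int)) (max_bearing_difference : Int) (out : List (List Int)) : Prop := out = merge_by_bearing_alt segments max_bearing_difference
instance (segments : List (List Int)) (max_bearing_difference : Int) (out : List (List Int)) : Decidable (Spec_merge_by_bearing segments max_bearing_difference out) := by unfold Spec_merge_by_bearing; infer_instance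

-- ===== CLAIM (what is proved, stated in full; the proofs are below) =====
def Claim_equal_merge_by_bearing : Prop := ∀ (segments : List (List Int)) (max_bearing_difference : Int), Dom_merge_by_bearing segments max_bearing_difference → Pre_merge_by_bearing segments max_bearing_difference → Spec_merge_by_bearing segments max_bearing_difference (merge_by_bearing segments max_bearing_difference)

-- ===== LEMMAS AND PROOFS =====

-- the value A writes into merged[-1] when it merges cur into it
def pvMerge (cur s : List Int) : List Int :=
  [cur.getD 0 0, s.getD 1 0, cur.getD 2 0 + s.getD 2 0] ++ s.drop 3

-- mid-level recursive characterisation of A's loop: the carried last element made explicit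
def pvSpecGo (m : Int) (cur : List Int) : List (List Int) → List (List Int)
  | [] => [cur]
  | s :: rest =>
    if |s.getD 4 0| ≤ m then pvSpecGo m (pvMerge cur s) rest
    else cur :: pvSpecGo m s rest

theorem foldA_eq_specGo (m : Int) (rest : List (List Int)) :
    ∀ (acc : List (List Int)) (cur : List Int),
    rest.foldl (fun merged c =>
      if |c.getD 4 0| ≤ m then
        merged.dropLast ++
          [[(merged.getLastD []).getD 0 0, c.getD 1 0] ++
           [(merged.getLastD []).getD 2 0 + c.getD 2 0] ++ c.drop 3]
      else merged ++ [c]) (acc ++ [cur]) = acc ++ pvSpecGo m cur rest := by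
  induction rest with
  | nil => intro acc cur; simp [pvSpecGo]
  | cons s rest ih =>
    intro acc cur
    simp only [List.foldl_cons, pvSpecGo]
    by_cases h : |s.getD 4 0| ≤ m
    · simp only [h, if_pos, List.dropLast_concat, List.getLastD_concat]
      exact ih acc (pvMerge cur s)
    · simp only [h, if_neg, not_false_iff]
      rw [show (acc ++ [cur]) ++ [s] = (acc ++ [cur]) ++ [s] from rfl, ih (acc ++ [cur]) s]
      simp

theorem foldl_add_getD2 (c : Int) (l : List (List Int)) :
    l.foldl (fun a s => a + (s[2]?).getD 0) c = c + l.foldl (fun a s => a + (s[2]?).getD 0) 0 := by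
  induction l generalizing c with
  | nil => simp
  | cons s rest ih =>
    simp only [List.foldl_cons]
    rw [ih (c + (s[2]?).getD 0), ih (0 + (s[2]?).getD 0)]
    ring

theorem specGo_eq_altGo (m : Int) (rest : List (List Int)) :
    ∀ cur, pvSpecGo m cur rest = pvAltGo m (cur :: rest) := by
  induction rest with
  | nil => intro cur; simp [pvSpecGo, pvAltGo, pvSplitRun]
  | cons s rest ih =>
    intro cur
    by_cases h : |s.getD 4 0| ≤ m
    · simp only [pvSpecGo]
      rw [if_pos h, ih (pvMerge cur s)]
      rw [pvAltGo, pvAltGo]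
      simp only [pvSplitRun]
      rw [if_pos h]
      congr 1
      rcases hr : (pvSplitRun m rest).1 with _ | ⟨r, rs⟩
      · simp [pvMerge]
      · simp only [List.cons_ne_nil, if_neg, not_false_iff]
        simp [pvMerge]
        rw [foldl_add_getD2 ((r[2]?).getD 0) rs,
            foldl_add_getD2 ((s[2]?).getD 0 + (r[2]?).getD 0) rs]
        ring
    · simp only [pvSpecGo]
      rw [if_neg h, ih s]
      conv_rhs => rw [pvAltGo]
      simp only [pvSplitRun]
      rw [if_neg h]
      simp

-- ===== VERDICT (by name: the statement is the Claim_ definition above) =====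
theorem merge_by_bearing_spec : Claim_equal_merge_by_bearing := by
  intro segments m _ _
  unfold Spec_merge_by_bearing merge_by_bearing merge_by_bearing_alt
  cases segments with
  | nil => simp [pvAltGo]
  | cons s0 rest =>
    simp only [List.length_cons, List.tail_cons, List.headD_cons,
      Nat.succ_pos, if_pos, gt_iff_lt]
    have := foldA_eq_specGo m rest [] s0
    simp only [List.nil_append] at this
    rw [this, specGo_eq_altGo]
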